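-- pv_equiv track=rewrite | github.com/balazstobak/pingpong26 | egyeni_noi.py | generate_optimal_schedule
-- ===== SOURCE A (Python) =====
-- import itertools
--
-- def generate_optimal_schedule(players):
--     """
--     Legenerálja az összes körmérkőzést, majd sorba rendezi őket úgy,
--     hogy a játékosok a lehető legkevesebbszer játsszanak egymás után.
--     """
--     all_matches = list(itertools.combinations(players, 2))
--     scheduled = []
--
--     while all_matches:
--         if not scheduled:
--             scheduled.append(all_matches.pop(0))
--         else:
--             last_match_players = set(scheduled[-1])
--             best_match_idx = 0
--             # Keresünk egy meccset, amiben nem játszik az előző meccs egyik résztvevője sem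
--             for i, match in enumerate(all_matches):
--                 if not set(match).intersection(last_match_players):
--                     best_match_idx = i
--                     break
--             scheduled.append(all_matches.pop(best_match_idx))
--
--     return scheduled
-- ===== SOURCE B (Python) =====
-- import itertools
--
-- def generate_optimal_schedule(players):
--     """
--     Same greedy schedule computed with an inverted index and set algebra:
--     by_player maps each player to the set of remaining match indices that
--     contain them, live is the set of remaining indices, and each round's pick
--     is min(live - conflicts) (min(live) when everything conflicts) -- no
--     enumerate scan over match tuples and no list.pop shifting.
--     """
--     matches = list(itertools.combinations(players, 2))
--     by_player = {}
--     for i, (a, b) in enumerate(matches):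
--         by_player.setdefault(a, set()).add(i)
--         by_player.setdefault(b, set()).add(i)
--     live = set(range(len(matches)))
--     schedule = []
--     prev = None
--     while live:
--         if prev is None:
--             idx = min(live)
--         else:
--             free = live - by_player[prev[0]] - by_player[prev[1]]
--             idx = min(free) if free else min(live)
--         prev = matches[idx]
--         schedule.append(prev)
--         live.discard(idx)
--         by_player[prev[0]].discard(idx)
--         by_player[prev[1]].discard(idx)
--     return schedule
-- ===== Notes on version B (the rewrite author's own statement) =====
-- stated objective: alternative
-- what changed: B replaces A's per-round enumerate scan over match tuples plus list.pop(i) with an inverted index (player -> set of remaining match indices) and whole-set algebra: each round's pick is min(live - by_player[p] - by_player[q]), falling back to min(live); this is correct because A's remaining list stays in original index order, so its first disjoint match is exactly the smallest remaining index outside the two conflict sets.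
import Mathlib
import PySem

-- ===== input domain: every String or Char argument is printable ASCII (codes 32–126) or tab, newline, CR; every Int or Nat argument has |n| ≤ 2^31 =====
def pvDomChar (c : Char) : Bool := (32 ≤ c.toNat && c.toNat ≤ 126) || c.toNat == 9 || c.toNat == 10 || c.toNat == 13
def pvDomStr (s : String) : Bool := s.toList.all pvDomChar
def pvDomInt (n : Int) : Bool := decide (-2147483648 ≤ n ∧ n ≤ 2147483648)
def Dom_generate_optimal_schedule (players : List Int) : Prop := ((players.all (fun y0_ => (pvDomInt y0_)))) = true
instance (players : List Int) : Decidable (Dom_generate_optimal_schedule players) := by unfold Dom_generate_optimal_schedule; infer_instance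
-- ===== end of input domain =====

-- B computes the same greedy order via an inverted index (player -> set of remaining match
-- indices) and per-round set algebra min(live - conflicts), instead of A's enumerate scan
-- over match tuples plus list.pop(i).

-- ===== PORT A =====
-- itertools.combinations(players, 2), transliterated structurally (Source B makes the same call)
def pvCombos2 : List Int → List (Int × Int)
  | [] => []
  | x :: xs => (xs.map (fun y => (x, y))) ++ pvCombos2 xs

-- A's inner 'for i, match in enumerate(...)' with break: index of the first match disjoint
-- from the last match's players; none = the loop never broke (best_match_idx stays 0)
def pvFindIdx (p q : Int) : List (Int × Int) → Option Nat
  | [] => none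
  | (a, b) :: rest =>
      if a ≠ p ∧ a ≠ q ∧ b ≠ p ∧ b ≠ q then some 0
      else (pvFindIdx p q rest).map (· + 1)

-- needed by pvLoopA's termination proof
lemma pvFindIdx_lt_length {p q : Int} : ∀ {l : List (Int × Int)} {i : Nat},
    pvFindIdx p q l = some i → i < l.length := by
  intro l
  induction l with
  | nil => intro i h; simp [pvFindIdx] at h
  | cons m rest ih =>
    intro i h
    obtain ⟨a, b⟩ := m
    unfold pvFindIdx at h
    split at h
    · simp at h ⊢; omega
    · simp only [Option.map_eq_some_iff] at h
      obtain ⟨j, hj, rfl⟩ := h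
      have := ih hj
      simp; omega

-- A's 'while all_matches:' loop; scheduled.append(all_matches.pop(idx)).
-- all_matches.pop(idx) never raises (idx < length), so getD's default is never used.
def pvLoopA : List (Int × Int) → List (Int × Int) → List (Int × Int)
  | [], sched => sched
  | m0 :: rest, sched =>
    match sched.getLast? with
    | none => pvLoopA rest (sched ++ [m0])
    | some (p, q) =>
      let idx := (pvFindIdx p q (m0 :: rest)).getD 0
      pvLoopA ((m0 :: rest).eraseIdx idx) (sched ++ [(m0 :: rest).getD idx (0, 0)])
  termination_by all _ => all.length
  decreasing_by
  · simp
  · have hidx : (pvFindIdx p q (m0 :: rest)).getD 0 < (m0 :: rest).length := by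
      cases h : pvFindIdx p q (m0 :: rest) with
      | none => simp
      | some i => simpa using pvFindIdx_lt_length h
    simp at hidx
    simp [List.length_eraseIdx]
    split <;> omega

def generate_optimal_schedule (players : List Int) : List (Int × Int) :=
  pvLoopA (pvCombos2 players) []

-- ===== PORT B =====
-- Source B's build loop body: by_player.setdefault(a, set()).add(i); same for b
def pvBuildStep (d : PySem.Dict Int (PySem.Set Int)) (p : Int × (Int × Int)) :
    PySem.Dict Int (PySem.Set Int) :=
  (d.modify p.2.1 [] (fun s => PySem.Set.add s p.1)).modify p.2.2 [] (fun s => PySem.Set.add s p.1)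

-- for i, (a, b) in enumerate(matches): by_player[a].add(i); by_player[b].add(i)
def pvBuckets (ms : List (Int × Int)) : PySem.Dict Int (PySem.Set Int) :=
  (PySem.List.enumerate ms).foldl pvBuildStep PySem.Dict.empty

-- Source B's 'while live:' loop.  Fuel = len(live): each round removes exactly one element of
-- live (the pick is min of live or of a subset of it), so the while-loop runs len(live)
-- times.  by_player[prev[0]] / by_player[prev[1]] are keys that are always present (prev is
-- a match), so the getD default [] is never used there.
def pvLoopB (ms : List (Int × Int)) :
    Nat → PySem.Set Int → PySem.Dict Int (PySem.Set Int) → Option (Int × Int) →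
    List (Int × Int) → List (Int × Int)
  | 0, _, _, _, sched => sched
  | fuel + 1, live, d, prev, sched =>
    match live with
    | [] => sched
    | _ :: _ =>
      let idx :=
        match prev with
        | none => (PySem.List.min? live (fun x => x)).getD 0
        | some (p, q) =>
          let free := PySem.Set.diff (PySem.Set.diff live (d.getD p [])) (d.getD q [])
          match free with
          | [] => (PySem.List.min? live (fun x => x)).getD 0
          | _ :: _ => (PySem.List.min? free (fun x => x)).getD 0
      let m := PySem.List.pyGetD ms idx (0, 0)
      pvLoopB ms fuel (PySem.Set.discard live idx)
        ((d.modify m.1 [] (fun s => PySem.Set.discard s idx)).modify m.2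
          [] (fun s => PySem.Set.discard s idx))
        (some m) (sched ++ [m])

def generate_optimal_schedule_alt (players : List Int) : List (Int × Int) :=
  let ms := pvCombos2 players
  let live := PySem.Set.ofList (PySem.List.pyRange 0 (ms.length : Int) 1)
  pvLoopB ms live.length live (pvBuckets ms) none []

-- ===== PRECONDITION & SPEC =====
def Spec_generate_optimal_schedule (players : List Int) (out : List (Int × Int)) : Prop := out = generate_optimal_schedule_alt players
instance (players : List Int) (out : List (Int × Int)) : Decidable (Spec_generate_optimal_schedule players out) := by unfold Spec_generate_optimal_schedule; infer_instance

-- ===== CLAIM =====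
def Claim_equal_generate_optimal_schedule : Prop := ∀ (players : List Int), Dom_generate_optimal_schedule players → Spec_generate_optimal_schedule players (generate_optimal_schedule players)

-- ===== LEMMAS AND PROOFS =====

-- ms[k] (all reads are in range; (0,0) is the unused default)
def pvGetM (ms : List (Int × Int)) (k : Int) : Int × Int := PySem.List.pyGetD ms k (0, 0)

-- the match m is disjoint from the last match's players {p, q}
def pvDisj (p q : Int) (m : Int × Int) : Bool := m.1 != p && m.1 != q && m.2 != p && m.2 != q

-- split the live-index list at the first index whose match is disjoint from {p, q}
def pvSplit (ms : List (Int × Int)) (p q : Int) : List Int → Option (List Int × Int × List Int)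
  | [] => none
  | k :: rest =>
      if pvDisj p q (pvGetM ms k) then some ([], k, rest)
      else (pvSplit ms p q rest).map (fun cjr => (k :: cjr.1, cjr.2.1, cjr.2.2))

lemma pvSplit_some {ms : List (Int × Int)} {p q : Int} : ∀ {L C : List Int} {j : Int} {R : List Int},
    pvSplit ms p q L = some (C, j, R) → L = C ++ j :: R := by
  intro L
  induction L with
  | nil => intro C j R h; simp [pvSplit] at h
  | cons k rest ih =>
    intro C j R h
    unfold pvSplit at h
    split at h
    · simp at h; obtain ⟨rfl, rfl, rfl⟩ := h; rfl
    · simp only [Option.map_eq_some_iff] at h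
      obtain ⟨⟨C', j', R'⟩, hs, he⟩ := h
      simp at he
      obtain ⟨rfl, rfl, rfl⟩ := he
      simp [ih hs]

lemma pvFindIdx_map {ms : List (Int × Int)} {p q : Int} : ∀ (L : List Int),
    pvFindIdx p q (L.map (pvGetM ms)) = (pvSplit ms p q L).map (fun cjr => cjr.1.length) := by
  intro L
  induction L with
  | nil => simp [pvFindIdx, pvSplit]
  | cons k rest ih =>
    rcases hab : pvGetM ms k with ⟨a, b⟩
    by_cases hd : pvDisj p q (a, b) = true
    · have hd' : a ≠ p ∧ a ≠ q ∧ b ≠ p ∧ b ≠ q := by simp [pvDisj] at hd; tauto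
      simp [pvFindIdx, pvSplit, hab, hd, hd']
    · have hd' : ¬(a ≠ p ∧ a ≠ q ∧ b ≠ p ∧ b ≠ q) := by simp [pvDisj] at hd; tauto
      simp only [List.map_cons, pvFindIdx, pvSplit, hab, hd, hd', if_false, ih]
      cases pvSplit ms p q rest <;> simp

-- filter of the disjointness test, phrased through pvSplit
lemma pvFilter_split {ms : List (Int × Int)} {p q : Int} : ∀ (L : List Int),
    L.filter (fun i => pvDisj p q (pvGetM ms i)) =
      (match pvSplit ms p q L with
       | none => []
       | some (_, j, R) => j :: R.filter (fun i => pvDisj p q (pvGetM ms i))) := by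
  intro L
  induction L with
  | nil => simp [pvSplit]
  | cons k rest ih =>
    by_cases hd : pvDisj p q (pvGetM ms k) = true
    · simp [pvSplit, hd]
    · rw [List.filter_cons, if_neg hd, ih]
      cases h : pvSplit ms p q rest with
      | none => simp [pvSplit, hd, h]
      | some cjr => obtain ⟨C, j, R⟩ := cjr; simp [pvSplit, hd, h]

-- min of a strictly increasing nonempty list is its head
lemma pvMin_head {i : Int} {rest : List Int} (h : (i :: rest).Pairwise (· < ·)) :
    PySem.List.min? (i :: rest) (fun x => x) = some i := by
  cases hm : PySem.List.min? (i :: rest) (fun x => x) with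
  | none => simp [PySem.List.min?_eq_none_iff] at hm
  | some m =>
    have hmem := PySem.List.min?_mem hm
    have hmin := PySem.List.min?_isMin hm i (by simp)
    rcases List.mem_cons.mp hmem with rfl | hmr
    · rfl
    · have hlt : i < m := (List.pairwise_cons.mp h).1 m hmr
      simp only at hmin
      omega

-- the two set differences ARE the filter by the disjointness test (under the bucket invariant)
lemma pvFree_eq {ms : List (Int × Int)} {live : List Int} {d : PySem.Dict Int (PySem.Set Int)}
    {p q : Int}
    (hinv : ∀ x i, i ∈ live → (i ∈ d.getD x [] ↔ ((pvGetM ms i).1 = x ∨ (pvGetM ms i).2 = x))) :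
    PySem.Set.diff (PySem.Set.diff live (d.getD p [])) (d.getD q []) =
      live.filter (fun i => pvDisj p q (pvGetM ms i)) := by
  unfold PySem.Set.diff
  rw [List.filter_filter]
  refine List.filter_congr ?_
  intro i hi
  have h1 := hinv p i hi
  have h2 := hinv q i hi
  rw [Bool.eq_iff_iff]
  simp only [Bool.and_eq_true, Bool.not_eq_true', PySem.Set.contains_eq_listContains,
    List.contains_eq_mem, decide_eq_false_iff_not, pvDisj, bne_iff_ne, ne_eq, h1, h2]
  tauto

-- set.discard on a nodup split
lemma pvDiscard_eq {C : List Int} {j : Int} {R : List Int}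
    (h : (C ++ j :: R).Nodup) : PySem.Set.discard (C ++ j :: R) j = C ++ R := by
  rw [List.nodup_append] at h
  obtain ⟨-, hndR, hdisj⟩ := h
  have hjC : j ∉ C := fun hj => hdisj j hj j (by simp) rfl
  have hjR : j ∉ R := (List.nodup_cons.mp hndR).1
  unfold PySem.Set.discard
  rw [List.filter_append, List.filter_cons]
  have hC : C.filter (fun y => !y == j) = C :=
    List.filter_eq_self.mpr (fun x hx => by simp; exact fun he => hjC (he ▸ hx))
  have hR : R.filter (fun y => !y == j) = R :=
    List.filter_eq_self.mpr (fun x hx => by simp; exact fun he => hjR (he ▸ hx))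
  simp [hC, hR]

-- one round's bucket update does not change membership of any index other than the removed one
lemma pvMem_modify2 (d : PySem.Dict Int (PySem.Set Int)) (a b idx x i : Int) (hne : i ≠ idx) :
    i ∈ ((d.modify a [] (fun s => PySem.Set.discard s idx)).modify b
        [] (fun s => PySem.Set.discard s idx)).getD x [] ↔ i ∈ d.getD x [] := by
  simp only [PySem.Dict.modify, PySem.Dict.getD_insert]
  split_ifs <;> simp_all [PySem.Set.mem_discard]

-- one build step adds exactly index k to the buckets of the two endpoints
lemma pvMem_buildStep (d : PySem.Dict Int (PySem.Set Int)) (k a b x i : Int) :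
    i ∈ (pvBuildStep d (k, (a, b))).getD x [] ↔
      i ∈ d.getD x [] ∨ (i = k ∧ (x = a ∨ x = b)) := by
  simp only [pvBuildStep, PySem.Dict.modify, PySem.Dict.getD_insert]
  split_ifs <;> simp_all [PySem.Set.mem_add]

-- characterisation of the build fold
lemma pvBuild_mem : ∀ (l : List (Int × Int)) (k : Int) (d : PySem.Dict Int (PySem.Set Int))
    (x i : Int),
    i ∈ ((PySem.List.enumerate l k).foldl pvBuildStep d).getD x [] ↔
      i ∈ d.getD x [] ∨ ∃ j : Nat, ∃ h : j < l.length,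
        i = k + (j : Int) ∧ (x = (l[j]'h).1 ∨ x = (l[j]'h).2) := by
  intro l
  induction l with
  | nil => intro k d x i; simp [PySem.List.enumerate_nil]
  | cons m t ih =>
    intro k d x i
    obtain ⟨a, b⟩ := m
    rw [PySem.List.enumerate_cons, List.foldl_cons, ih, pvMem_buildStep]
    constructor
    · rintro ((hd | ⟨rfl, hx⟩) | ⟨j, hj, hi, hx⟩)
      · exact Or.inl hd
      · exact Or.inr ⟨0, by simp, by simp, by simpa using hx⟩
      · exact Or.inr ⟨j + 1, by simpa using hj, by push_cast at hi ⊢; omega,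
          by simpa using hx⟩
    · rintro (hd | ⟨j, hj, hi, hx⟩)
      · exact Or.inl (Or.inl hd)
      · cases j with
        | zero => exact Or.inl (Or.inr ⟨by simpa using hi, by simpa using hx⟩)
        | succ j' => exact Or.inr ⟨j', by simpa using hj, by push_cast at hi ⊢; omega,
            by simpa using hx⟩

lemma pvEraseIdx_append {α : Type} : ∀ (C : List α) (j : α) (R : List α),
    (C ++ j :: R).eraseIdx C.length = C ++ R := by
  intro C j R
  induction C with
  | nil => rfl
  | cons c rest ih => simp [ih]

lemma pvGetD_append {α : Type} [Inhabited α] : ∀ (C : List α) (j : α) (R : List α) (d : α),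
    (C ++ j :: R).getD C.length d = j := by
  intro C j R d
  induction C with
  | nil => rfl
  | cons c rest ih => simp

-- main induction: A's loop over the remaining-match list = B's loop over the live-index set
lemma pvMain (ms : List (Int × Int)) : ∀ (fuel : Nat) (live : List Int)
    (d : PySem.Dict Int (PySem.Set Int)) (prev : Option (Int × Int)) (sched : List (Int × Int)),
    live.length = fuel →
    live.Pairwise (· < ·) →
    (∀ x i, i ∈ live → (i ∈ d.getD x [] ↔ ((pvGetM ms i).1 = x ∨ (pvGetM ms i).2 = x))) →
    prev = sched.getLast? →
    pvLoopA (live.map (pvGetM ms)) sched = pvLoopB ms fuel live d prev sched := by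
  intro fuel
  induction fuel with
  | zero =>
    intro live d prev sched hlen _ _ _
    rw [List.eq_nil_of_length_eq_zero hlen]
    simp [pvLoopA, pvLoopB]
  | succ n ih =>
    intro live d prev sched hlen hsort hinv hprev
    cases live with
    | nil => simp at hlen
    | cons i0 rest =>
      have hmin : PySem.List.min? (i0 :: rest) (fun x => x) = some i0 := pvMin_head hsort
      have hnd : (i0 :: rest).Nodup := hsort.imp (fun h => ne_of_lt h)
      cases prev with
      | none =>
        have hsched : sched = [] := List.getLast?_eq_none_iff.mp hprev.symm
        subst hsched
        -- one round of A
        have hA : pvLoopA ((i0 :: rest).map (pvGetM ms)) [] =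
            pvLoopA (rest.map (pvGetM ms)) [pvGetM ms i0] := by
          rw [List.map_cons, pvLoopA]
          rfl
        -- one round of B
        have hB : pvLoopB ms (n + 1) (i0 :: rest) d none [] =
            pvLoopB ms n (PySem.Set.discard (i0 :: rest) i0)
              ((d.modify (pvGetM ms i0).1 [] (fun s => PySem.Set.discard s i0)).modify
                (pvGetM ms i0).2 [] (fun s => PySem.Set.discard s i0))
              (some (pvGetM ms i0)) [pvGetM ms i0] := by
          rw [pvLoopB]
          simp only [hmin, Option.getD_some]
          rfl
        rw [hA, hB]
        have hdisc : PySem.Set.discard (i0 :: rest) i0 = rest :=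
          pvDiscard_eq (C := []) (h := hnd)
        rw [hdisc]
        refine ih rest _ _ _ (by simpa using hlen) (List.pairwise_cons.mp hsort).2 ?_ (by simp)
        intro x i hi
        have hne : i ≠ i0 := fun he => (List.nodup_cons.mp hnd).1 (he ▸ hi)
        rw [pvMem_modify2 _ _ _ _ _ _ hne]
        exact hinv x i (List.mem_cons_of_mem _ hi)
      | some pq =>
        obtain ⟨p, q⟩ := pq
        have hlast : sched.getLast? = some (p, q) := hprev.symm
        have hA : pvLoopA ((i0 :: rest).map (pvGetM ms)) sched =
            pvLoopA (((pvGetM ms i0 :: rest.map (pvGetM ms))).eraseIdx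
                ((pvFindIdx p q (pvGetM ms i0 :: rest.map (pvGetM ms))).getD 0))
              (sched ++ [(pvGetM ms i0 :: rest.map (pvGetM ms)).getD
                ((pvFindIdx p q (pvGetM ms i0 :: rest.map (pvGetM ms))).getD 0) (0, 0)]) := by
          rw [List.map_cons, pvLoopA, hlast]
        rw [hA]
        have hfm := pvFindIdx_map (ms := ms) (p := p) (q := q) (i0 :: rest)
        rw [List.map_cons] at hfm
        have hfree : PySem.Set.diff (PySem.Set.diff (i0 :: rest) (d.getD p [])) (d.getD q []) =
            (i0 :: rest).filter (fun i => pvDisj p q (pvGetM ms i)) :=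
          pvFree_eq hinv
        cases hsp : pvSplit ms p q (i0 :: rest) with
        | none =>
          have hfnil : PySem.Set.diff (PySem.Set.diff (i0 :: rest) (d.getD p []))
              (d.getD q []) = [] := by
            rw [hfree, pvFilter_split, hsp]
          have hB : pvLoopB ms (n + 1) (i0 :: rest) d (some (p, q)) sched =
              pvLoopB ms n (PySem.Set.discard (i0 :: rest) i0)
                ((d.modify (pvGetM ms i0).1 [] (fun s => PySem.Set.discard s i0)).modify
                  (pvGetM ms i0).2 [] (fun s => PySem.Set.discard s i0))
                (some (pvGetM ms i0)) (sched ++ [pvGetM ms i0]) := by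
            rw [pvLoopB]
            simp only [hfnil, hmin, Option.getD_some]
            rfl
          rw [hsp] at hfm
          simp only [Option.map_none] at hfm
          rw [hfm]
          simp only [Option.getD_none, List.eraseIdx_cons_zero, List.getD_cons_zero]
          rw [hB]
          have hdisc : PySem.Set.discard (i0 :: rest) i0 = rest :=
            pvDiscard_eq (C := []) (h := hnd)
          rw [hdisc]
          refine ih rest _ _ _ (by simpa using hlen) (List.pairwise_cons.mp hsort).2 ?_
            (by simp)
          intro x i hi
          have hne : i ≠ i0 := fun he => (List.nodup_cons.mp hnd).1 (he ▸ hi)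
          rw [pvMem_modify2 _ _ _ _ _ _ hne]
          exact hinv x i (List.mem_cons_of_mem _ hi)
        | some cjr =>
          obtain ⟨C, j, R⟩ := cjr
          have hLeq : i0 :: rest = C ++ j :: R := pvSplit_some hsp
          have hfcons : PySem.Set.diff (PySem.Set.diff (i0 :: rest) (d.getD p []))
              (d.getD q []) = j :: R.filter (fun i => pvDisj p q (pvGetM ms i)) := by
            rw [hfree, pvFilter_split, hsp]
          have hfsort : (j :: R.filter (fun i => pvDisj p q (pvGetM ms i))).Pairwise
              (· < ·) := by
            rw [← hfcons, hfree]
            exact hsort.sublist List.filter_sublist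
          have hminf : PySem.List.min? (j :: R.filter
              (fun i => pvDisj p q (pvGetM ms i))) (fun x => x) = some j :=
            pvMin_head hfsort
          have hB : pvLoopB ms (n + 1) (i0 :: rest) d (some (p, q)) sched =
              pvLoopB ms n (PySem.Set.discard (i0 :: rest) j)
                ((d.modify (pvGetM ms j).1 [] (fun s => PySem.Set.discard s j)).modify
                  (pvGetM ms j).2 [] (fun s => PySem.Set.discard s j))
                (some (pvGetM ms j)) (sched ++ [pvGetM ms j]) := by
            rw [pvLoopB]
            simp only [hfcons, hminf, Option.getD_some]
            rfl
          rw [hsp] at hfm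
          simp only [Option.map_some] at hfm
          rw [hfm, hB]
          simp only [Option.getD_some]
          -- A side: eraseIdx / getD through the split
          have hmapL : (pvGetM ms i0 :: rest.map (pvGetM ms)) =
              C.map (pvGetM ms) ++ pvGetM ms j :: R.map (pvGetM ms) := by
            rw [← List.map_cons, hLeq]; simp
          have hCl : C.length = (C.map (pvGetM ms)).length := by simp
          rw [hmapL, hCl, pvEraseIdx_append, pvGetD_append]
          have hmapCR : C.map (pvGetM ms) ++ R.map (pvGetM ms) = (C ++ R).map (pvGetM ms) := by
            simp
          rw [hmapCR]
          have hndL : (C ++ j :: R).Nodup := hLeq ▸ hnd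
          have hdisc : PySem.Set.discard (i0 :: rest) j = C ++ R := by
            rw [hLeq]; exact pvDiscard_eq hndL
          rw [hdisc]
          have hsortCR : (C ++ R).Pairwise (· < ·) :=
            (hLeq ▸ hsort).sublist ((List.sublist_cons_self j R).append_left C)
          have hlenCR : (C ++ R).length = n := by
            have h1 : (i0 :: rest).length = (C ++ j :: R).length := by rw [hLeq]
            simp at h1 hlen ⊢
            omega
          refine ih (C ++ R) _ _ _ hlenCR hsortCR ?_ (by simp)
          intro x i hi
          have hiL : i ∈ i0 :: rest := by
            rw [hLeq]
            simp only [List.mem_append, List.mem_cons] at hi ⊢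
            tauto
          have hne : i ≠ j := by
            intro he
            subst he
            rw [List.nodup_append] at hndL
            obtain ⟨-, hndR, hdisj⟩ := hndL
            rcases List.mem_append.mp hi with hiC | hiR
            · exact hdisj i hiC i (by simp) rfl
            · exact (List.nodup_cons.mp hndR).1 hiR
          rw [pvMem_modify2 _ _ _ _ _ _ hne]
          exact hinv x i hiL

-- ===== VERDICT (by name: the statement is the Claim_ definition above) =====
theorem generate_optimal_schedule_spec : Claim_equal_generate_optimal_schedule := by
  unfold Claim_equal_generate_optimal_schedule
  intro players _
  unfold Spec_generate_optimal_schedule generate_optimal_schedule generate_optimal_schedule_alt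
  simp only []
  set ms := pvCombos2 players with hms
  have hrange : PySem.List.pyRange 0 ((ms.length : Int)) 1 =
      (List.range ms.length).map (fun k : Nat => (k : Int)) :=
    PySem.List.pyRange_zero_natCast ms.length
  have hndr : ((List.range ms.length).map (fun k : Nat => (k : Int))).Nodup :=
    List.Nodup.map (fun a b h => by exact_mod_cast h) List.nodup_range
  have hlive : PySem.Set.ofList (PySem.List.pyRange 0 ((ms.length : Int)) 1) =
      (List.range ms.length).map (fun k : Nat => (k : Int)) := by
    rw [hrange]
    exact PySem.Set.ofList_eq_self_of_nodup _ hndr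
  rw [hlive]
  have hsort : ((List.range ms.length).map (fun k : Nat => (k : Int))).Pairwise (· < ·) :=
    List.pairwise_map.mpr ((List.pairwise_lt_range).imp (fun h => by exact_mod_cast h))
  have hmap : ((List.range ms.length).map (fun k : Nat => (k : Int))).map (pvGetM ms) = ms := by
    rw [List.map_map]
    apply List.ext_getElem (by simp)
    intro n h1 h2
    simp only [List.getElem_map, List.getElem_range, Function.comp_apply]
    rw [pvGetM, PySem.List.pyGetD_natCast, List.getD_eq_getElem]
  have hinv0 : ∀ x i, i ∈ (List.range ms.length).map (fun k : Nat => (k : Int)) →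
      (i ∈ (pvBuckets ms).getD x [] ↔ ((pvGetM ms i).1 = x ∨ (pvGetM ms i).2 = x)) := by
    intro x i hi
    simp only [List.mem_map, List.mem_range] at hi
    obtain ⟨jn, hjn, rfl⟩ := hi
    rw [pvBuckets, pvBuild_mem]
    have hempty : (PySem.Dict.empty : PySem.Dict Int (PySem.Set Int)).getD x [] = [] := rfl
    rw [hempty]
    simp only [List.not_mem_nil, false_or, zero_add]
    constructor
    · rintro ⟨j, hj, hij, hx⟩
      have : jn = j := by exact_mod_cast hij
      subst this
      rw [pvGetM, PySem.List.pyGetD_natCast, List.getD_eq_getElem _ _ hjn]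
      tauto
    · intro hx
      refine ⟨jn, hjn, rfl, ?_⟩
      rw [pvGetM, PySem.List.pyGetD_natCast, List.getD_eq_getElem _ _ hjn] at hx
      tauto
  calc pvLoopA ms [] = pvLoopA (((List.range ms.length).map (fun k : Nat => (k : Int))).map
        (pvGetM ms)) [] := by rw [hmap]
    _ = _ := pvMain ms _ _ _ none [] (by simp) hsort hinv0 (by simp)
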